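-- pv_equiv track=rewrite | github.com/nalin520/Simca_model | simca/preprocessing.py | starting_index_and_check
-- ===== SOURCE A (Python) =====
-- def starting_index_and_check(lst):
--     n = len(lst)
--     # Consider adjusting or removing this length check if not needed
--     if n < 200:
--         return -1
--     for i in range(0, n - 1):
--         # Allow non-strict monotonicity
--         if n - i >= 200:
--             # Non-decreasing check
--             if all(lst[j] <= lst[j + 1] for j in range(i, n - 1)):
--                 return i
--             # Non-increasing check
--             if all(lst[j] >= lst[j + 1] for j in range(i, n - 1)):
--                 return i
--         else:
--             break
--     return -1
-- ===== SOURCE B (Python) =====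
-- def starting_index_and_check(lst):
--     n = len(lst)
--     if n < 200:
--         return -1
--     # One forward pass: s_inc = minimal start of a non-decreasing suffix
--     # (= 1 + last position j with lst[j] > lst[j+1]); s_dec analogously.
--     s_inc = 0
--     s_dec = 0
--     for j in range(n - 1):
--         if lst[j] > lst[j + 1]:
--             s_inc = j + 1
--         if lst[j] < lst[j + 1]:
--             s_dec = j + 1
--     m = min(s_inc, s_dec)
--     return m if m <= n - 200 else -1
-- ===== Notes on version B (the rewrite author's own statement) =====
-- stated objective: faster
-- what changed: Replaces the quadratic scan (for each candidate start, re-check the whole suffix with all()) by one linear pass that records the last monotonicity-violation position for each direction and compares the resulting minimal start with the n-200 threshold.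
import Mathlib
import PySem

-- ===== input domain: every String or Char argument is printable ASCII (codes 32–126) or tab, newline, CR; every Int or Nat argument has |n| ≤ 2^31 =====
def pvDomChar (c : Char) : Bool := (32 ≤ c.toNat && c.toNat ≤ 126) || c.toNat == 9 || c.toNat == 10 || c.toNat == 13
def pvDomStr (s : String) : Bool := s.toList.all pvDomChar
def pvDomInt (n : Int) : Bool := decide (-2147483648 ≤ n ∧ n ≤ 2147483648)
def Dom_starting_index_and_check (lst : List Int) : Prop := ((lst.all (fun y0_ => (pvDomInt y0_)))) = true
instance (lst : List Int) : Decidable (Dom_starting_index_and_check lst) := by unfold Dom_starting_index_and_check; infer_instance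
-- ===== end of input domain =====

-- B replaces A's quadratic rescan of every candidate suffix by one linear pass
-- recording the last monotonicity-violation position in each direction (objective: faster, measured).


-- ===== PORT A =====
-- all indices j, j+1 used below lie in [0, n-1], so `getD _ 0` is exact for Python's lst[j]
def aGo (lst : List Int) (n i : Nat) : Int :=
  if i < n - 1 then
    if n - i ≥ 200 then
      if (List.range' i (n - 1 - i)).all (fun j => decide (lst.getD j 0 ≤ lst.getD (j+1) 0)) then (i : Int)
      else if (List.range' i (n - 1 - i)).all (fun j => decide (lst.getD j 0 ≥ lst.getD (j+1) 0)) then (i : Int)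
      else aGo lst n (i+1)
    else -1
  else -1
termination_by n - 1 - i
decreasing_by omega

def starting_index_and_check (lst : List Int) : Int :=
  let n := lst.length
  if n < 200 then -1 else aGo lst n 0

-- ===== PORT B =====
def bStep (lst : List Int) (s : Nat × Nat) (j : Nat) : Nat × Nat :=
  ((if lst.getD j 0 > lst.getD (j+1) 0 then j + 1 else s.1),
   (if lst.getD j 0 < lst.getD (j+1) 0 then j + 1 else s.2))

def starting_index_and_check_alt (lst : List Int) : Int :=
  let n := lst.length
  if n < 200 then -1
  else
    let s := (List.range (n - 1)).foldl (bStep lst) (0, 0)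
    let m := Nat.min s.1 s.2
    if m ≤ n - 200 then (m : Int) else -1

-- ===== PRECONDITION & SPEC =====
def Spec_starting_index_and_check (lst : List Int) (out : Int) : Prop := out = starting_index_and_check_alt lst
instance (lst : List Int) (out : Int) : Decidable (Spec_starting_index_and_check lst out) := by unfold Spec_starting_index_and_check; infer_instance

-- ===== CLAIM (what is proved, stated in full; the proofs are below) =====
def Claim_equal_starting_index_and_check : Prop := ∀ (lst : List Int), Dom_starting_index_and_check lst → Spec_starting_index_and_check lst (starting_index_and_check lst)

-- ===== LEMMAS AND PROOFS =====

-- invariant of B's fold: after processing range m, each component s is ≤ m, the tail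
-- [s, m) is violation-free, and s is 0 or marks a violation at s-1
theorem bFold_inv (lst : List Int) (m : Nat) :
    let s := (List.range m).foldl (bStep lst) (0, 0)
    (s.1 ≤ m ∧ (∀ j, s.1 ≤ j → j < m → lst.getD j 0 ≤ lst.getD (j+1) 0) ∧
      (s.1 = 0 ∨ lst.getD (s.1 - 1) 0 > lst.getD s.1 0)) ∧
    (s.2 ≤ m ∧ (∀ j, s.2 ≤ j → j < m → lst.getD j 0 ≥ lst.getD (j+1) 0) ∧
      (s.2 = 0 ∨ lst.getD (s.2 - 1) 0 < lst.getD s.2 0)) := by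
  induction m with
  | zero => simp
  | succ m ih =>
    simp only [List.range_succ, List.foldl_append, List.foldl_cons, List.foldl_nil] at *
    set s := (List.range m).foldl (bStep lst) (0, 0) with hs
    obtain ⟨⟨h1a, h1b, h1c⟩, ⟨h2a, h2b, h2c⟩⟩ := ih
    unfold bStep
    constructor
    · by_cases h : lst.getD m 0 > lst.getD (m+1) 0
      · simp only [h, if_pos]
        refine ⟨by omega, ?_, Or.inr (by simpa using h)⟩
        intro j hj hj'; omega
      · simp only [h, if_neg, not_false_iff]
        refine ⟨by omega, ?_, h1c⟩
        intro j hj hj'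
        rcases Nat.lt_succ_iff_lt_or_eq.mp hj' with h' | h'
        · exact h1b j hj h'
        · subst h'; omega
    · by_cases h : lst.getD m 0 < lst.getD (m+1) 0
      · simp only [h, if_pos]
        refine ⟨by omega, ?_, Or.inr (by simpa using h)⟩
        intro j hj hj'; omega
      · simp only [h, if_neg, not_false_iff]
        refine ⟨by omega, ?_, h2c⟩
        intro j hj hj'
        rcases Nat.lt_succ_iff_lt_or_eq.mp hj' with h' | h'
        · exact h2b j hj h'
        · subst h'; omega

theorem all_range'_iff (lst : List Int) (i k : Nat) (p : Int → Int → Prop) [DecidablePred fun j : Nat => p (lst.getD j 0) (lst.getD (j+1) 0)] :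
    ((List.range' i k).all (fun j => decide (p (lst.getD j 0) (lst.getD (j+1) 0))) = true) ↔
      (∀ j, i ≤ j → j < i + k → p (lst.getD j 0) (lst.getD (j+1) 0)) := by
  simp only [List.all_eq_true, List.mem_range'_1, decide_eq_true_eq]
  constructor
  · intro h j hj hj'; exact h j ⟨hj, hj'⟩
  · intro h j ⟨hj, hj'⟩; exact h j hj hj'

-- main loop correspondence: scanning upward from any i ≤ m (m the lesser of B's two
-- suffix starts) returns m iff it fits the n-200 threshold
theorem aGo_eq (lst : List Int) (n : Nat) (h200 : 200 ≤ n)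
    (s1 s2 m : Nat) (hfold : (List.range (n-1)).foldl (bStep lst) (0, 0) = (s1, s2))
    (hm1 : m ≤ s1) (hm2 : m ≤ s2) (hmor : m = s1 ∨ m = s2) :
    ∀ i, i ≤ m → aGo lst n i = (if m ≤ n - 200 then (m : Int) else -1) := by
  have hinv := bFold_inv lst (n - 1)
  rw [hfold] at hinv
  dsimp only at hinv
  obtain ⟨⟨h1a, h1b, h1c⟩, ⟨h2a, h2b, h2c⟩⟩ := hinv
  intro i hi
  induction hk : m - i generalizing i with
  | zero =>
    -- i = m: the suffix from m is monotone in one direction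
    have him : i = m := by omega
    rw [him]
    by_cases hth : m ≤ n - 200
    · rw [if_pos hth]
      have hlt : m < n - 1 := by omega
      rw [aGo]
      rw [if_pos hlt, if_pos (by omega)]
      by_cases hca : (List.range' m (n - 1 - m)).all (fun j => decide (lst.getD j 0 ≤ lst.getD (j+1) 0)) = true
      · rw [if_pos hca]
      · rw [if_neg hca]
        have hcb : (List.range' m (n - 1 - m)).all (fun j => decide (lst.getD j 0 ≥ lst.getD (j+1) 0)) = true := by
          -- since the ≤-check failed, m ≠ s1, hence m = s2 and the ≥-suffix is clean
          rcases hmor with he | he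
          · exfalso
            apply hca
            rw [all_range'_iff lst m (n-1-m) (fun a b => a ≤ b)]
            intro j hj hj'
            exact h1b j (by omega) (by omega)
          · rw [all_range'_iff lst m (n-1-m) (fun a b => a ≥ b)]
            intro j hj hj'
            exact h2b j (by omega) (by omega)
        rw [if_pos hcb]
    · rw [if_neg hth]
      -- m > n-200: loop body breaks (or the loop is over)
      rw [aGo]
      by_cases hlt : m < n - 1
      · rw [if_pos hlt, if_neg (by omega)]
      · rw [if_neg hlt]
  | succ k ihk =>
    -- i < m: either break (threshold crossed) or both checks fail
    have hi' : i < m := by omega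
    have hlt : i < n - 1 := by omega
    rw [aGo, if_pos hlt]
    by_cases hbr : n - i ≥ 200
    · rw [if_pos hbr]
      have hca : ¬ (List.range' i (n - 1 - i)).all (fun j => decide (lst.getD j 0 ≤ lst.getD (j+1) 0)) = true := by
        intro h
        rw [all_range'_iff lst i (n-1-i) (fun a b => a ≤ b)] at h
        rcases h1c with h' | h'
        · omega
        · have hs : s1 - 1 + 1 = s1 := by omega
          have hv := h (s1 - 1) (by omega) (by omega)
          rw [hs] at hv; omega
      have hcb : ¬ (List.range' i (n - 1 - i)).all (fun j => decide (lst.getD j 0 ≥ lst.getD (j+1) 0)) = true := by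
        intro h
        rw [all_range'_iff lst i (n-1-i) (fun a b => a ≥ b)] at h
        rcases h2c with h' | h'
        · omega
        · have hs : s2 - 1 + 1 = s2 := by omega
          have hv := h (s2 - 1) (by omega) (by omega)
          rw [hs] at hv; omega
      rw [if_neg hca, if_neg hcb]
      exact ihk (i+1) (by omega) (by omega)
    · rw [if_neg hbr, if_neg (by omega : ¬ m ≤ n - 200)]

-- ===== VERDICT (by name: the statement is the Claim_ definition above) =====
theorem starting_index_and_check_spec : Claim_equal_starting_index_and_check := by
  intro lst _
  unfold Spec_starting_index_and_check starting_index_and_check starting_index_and_check_alt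
  by_cases h : lst.length < 200
  · rw [if_pos h, if_pos h]
  · rw [if_neg h, if_neg h]
    obtain ⟨s1, s2, hfold⟩ : ∃ s1 s2, (List.range (lst.length - 1)).foldl (bStep lst) (0, 0) = (s1, s2) :=
      ⟨_, _, rfl⟩
    simp only [hfold]
    rcases Nat.le_total s1 s2 with h' | h'
    · exact aGo_eq lst lst.length (by omega) s1 s2 (Nat.min s1 s2) hfold
        (Nat.min_le_left _ _) (Nat.min_le_right _ _) (Or.inl (Nat.min_eq_left h')) 0 (Nat.zero_le _)
    · exact aGo_eq lst lst.length (by omega) s1 s2 (Nat.min s1 s2) hfold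
        (Nat.min_le_left _ _) (Nat.min_le_right _ _) (Or.inr (Nat.min_eq_right h')) 0 (Nat.zero_le _)
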